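-- pv_equiv track=rewrite | github.com/Nibuja05/rune_wars | game/rune_wars/item_builder.py | BuildShop
-- ===== SOURCE A (Python) =====
-- def BuildShop(cores, runes):
-- 	abilityCoresStr, commonRunesStr, uncommonRunesStr, rareRunesStr, mythicalRunesStr = "","","","",""
-- 	for core in cores:
-- 		abilityCoresStr += "\t\t\"item\"\t\t" + core
-- 	for rarity, rune in runes:
-- 		if rarity == "common":
-- 			commonRunesStr += "\t\t\"item\"\t\t" + rune
-- 		if rarity == "uncommon":
-- 			uncommonRunesStr += "\t\t\"item\"\t\t" + rune
-- 		if rarity == "rare":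
-- 			rareRunesStr += "\t\t\"item\"\t\t" + rune
-- 		if rarity == "mythical":
-- 			mythicalRunesStr += "\t\t\"item\"\t\t" + rune
--
-- 	text = """"dota_shops"
-- {
-- 	"misc"
-- 	{
-- %s
-- 	}
--
-- 	// Level 1 - Green Recipes
-- 	"basics"
-- 	{
-- %s
-- 	}
--
-- 	// Level 2 - Blue Recipes
-- 	"magics"
-- 	{
-- %s
-- 	}
--
-- 	// Level 3 - Purple Recipes
-- 	"weapons"
-- 	{
-- %s
-- 	}
--
-- 	// Level 4 - Orange / Orb / Artifacts
-- 	"artifacts"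
-- 	{
-- %s
-- 	}
-- }
-- 	""" % (abilityCoresStr[:-1], commonRunesStr[:-1], uncommonRunesStr[:-1], rareRunesStr[:-1], mythicalRunesStr[:-1])
-- 	return text
-- ===== SOURCE B (Python) =====
-- TEMPLATE = """"dota_shops"
-- {
-- 	"misc"
-- 	{
-- %s
-- 	}
--
-- 	// Level 1 - Green Recipes
-- 	"basics"
-- 	{
-- %s
-- 	}
--
-- 	// Level 2 - Blue Recipes
-- 	"magics"
-- 	{
-- %s
-- 	}
--
-- 	// Level 3 - Purple Recipes
-- 	"weapons"
-- 	{
-- %s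
-- 	}
--
-- 	// Level 4 - Orange / Orb / Artifacts
-- 	"artifacts"
-- 	{
-- %s
-- 	}
-- }
-- 	"""
--
--
-- def _block(items):
--     # one formatted block: concatenated entries with the final character trimmed
--     return "".join('\t\t"item"\t\t' + x for x in items)[:-1]
--
--
-- def BuildShop(cores, runes):
--     blocks = [_block([rune for rarity, rune in runes if rarity == r])
--               for r in ("common", "uncommon", "rare", "mythical")]
--     return TEMPLATE % (_block(cores), *blocks)
-- ===== Notes on version B (the rewrite author's own statement) =====
-- stated objective: simpler
-- what changed: Replaces the five independent string += accumulators and the four per-rune if-tests with one declarative pipeline: a shared _block helper that filters the runes of each rarity, joins their formatted entries and trims the final character, applied uniformly to cores and the four rarities.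
import Mathlib
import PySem

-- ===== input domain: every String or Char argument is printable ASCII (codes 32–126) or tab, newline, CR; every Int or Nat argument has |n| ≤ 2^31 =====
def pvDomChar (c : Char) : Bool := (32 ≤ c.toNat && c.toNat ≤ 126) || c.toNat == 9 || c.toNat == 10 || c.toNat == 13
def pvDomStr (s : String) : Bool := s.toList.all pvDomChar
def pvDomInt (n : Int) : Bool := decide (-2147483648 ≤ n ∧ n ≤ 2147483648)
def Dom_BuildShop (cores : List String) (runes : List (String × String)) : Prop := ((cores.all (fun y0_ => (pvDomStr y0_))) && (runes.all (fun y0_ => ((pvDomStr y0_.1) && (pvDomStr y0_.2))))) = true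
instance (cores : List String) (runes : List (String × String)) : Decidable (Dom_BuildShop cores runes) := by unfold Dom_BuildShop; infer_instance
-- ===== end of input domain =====

-- B replaces A's five string += accumulators and four per-rune if-tests by one shared
-- filter/join/trim block helper applied uniformly (objective: simpler).

-- Template pieces around the five %s slots (identical in A and B).
def pvT0 : String := "\"dota_shops\"\n{\n\t\"misc\"\n\t{\n"
def pvT1 : String := "\n\t}\t\n\t\n\t// Level 1 - Green Recipes\n\t\"basics\"\n\t{\n"
def pvT2 : String := "\n\t}\n\n\t// Level 2 - Blue Recipes\n\t\"magics\"\n\t{\n"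
def pvT3 : String := "\n\t}\n\t\n\t// Level 3 - Purple Recipes\t\n\t\"weapons\"\n\t{\n"
def pvT4 : String := "\n\t}\n\t\n\t// Level 4 - Orange / Orb / Artifacts\n\t\"artifacts\"\n\t{\n"
def pvT5 : String := "\n\t}\n}\n\t"

-- ===== PORT A =====
def BuildShop (cores : List String) (runes : List (String × String)) : String :=
  let abilityCoresStr := cores.foldl (fun acc core => acc ++ "\t\t\"item\"\t\t" ++ core) ""
  let st := runes.foldl
    (fun (st : String × String × String × String) p =>
      let c := st.1; let u := st.2.1; let r := st.2.2.1; let m := st.2.2.2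
      let c := if p.1 == "common" then c ++ "\t\t\"item\"\t\t" ++ p.2 else c
      let u := if p.1 == "uncommon" then u ++ "\t\t\"item\"\t\t" ++ p.2 else u
      let r := if p.1 == "rare" then r ++ "\t\t\"item\"\t\t" ++ p.2 else r
      let m := if p.1 == "mythical" then m ++ "\t\t\"item\"\t\t" ++ p.2 else m
      (c, u, r, m))
    ("", "", "", "")
  pvT0 ++ PySem.Str.slice abilityCoresStr none (some (-1)) ++
  pvT1 ++ PySem.Str.slice st.1 none (some (-1)) ++
  pvT2 ++ PySem.Str.slice st.2.1 none (some (-1)) ++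
  pvT3 ++ PySem.Str.slice st.2.2.1 none (some (-1)) ++
  pvT4 ++ PySem.Str.slice st.2.2.2 none (some (-1)) ++ pvT5

-- ===== PORT B =====
def pvEntry (x : String) : String := "\t\t\"item\"\t\t" ++ x

def pvBlock (items : List String) : String :=
  PySem.Str.slice (PySem.Str.join "" (items.map pvEntry)) none (some (-1))

def BuildShop_alt (cores : List String) (runes : List (String × String)) : String :=
  let blocks := ["common", "uncommon", "rare", "mythical"].map
    (fun r => pvBlock ((runes.filter (fun p => p.1 == r)).map Prod.snd))
  pvT0 ++ pvBlock cores ++ pvT1 ++ blocks.getD 0 "" ++ pvT2 ++ blocks.getD 1 "" ++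
  pvT3 ++ blocks.getD 2 "" ++ pvT4 ++ blocks.getD 3 "" ++ pvT5

-- ===== PRECONDITION & SPEC =====
def Spec_BuildShop (cores : List String) (runes : List (String × String)) (out : String) : Prop := out = BuildShop_alt cores runes
instance (cores : List String) (runes : List (String × String)) (out : String) : Decidable (Spec_BuildShop cores runes out) := by unfold Spec_BuildShop; infer_instance

-- ===== CLAIM (what is proved, stated in full; the proofs are below) =====
def Claim_equal_BuildShop : Prop := ∀ (cores : List String) (runes : List (String × String)), Dom_BuildShop cores runes → Spec_BuildShop cores runes (BuildShop cores runes)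

-- ===== LEMMAS AND PROOFS =====

theorem pvJoin_nil : PySem.Str.join "" ([] : List String) = "" := by decide

theorem pvJoin_cons (x : String) (xs : List String) :
    PySem.Str.join "" (x :: xs) = x ++ PySem.Str.join "" xs := by
  apply String.toList_inj.mp
  cases xs with
  | nil => simp [PySem.Str.toList_join, PySem.Chars.join_singleton, PySem.Chars.join_nil]
  | cons y ys => simp [PySem.Str.toList_join, PySem.Chars.join_cons_cons]

-- the cores accumulator equals the joined formatted entries
theorem pvCores_fold (l : List String) (s : String) :
    l.foldl (fun acc core => acc ++ "\t\t\"item\"\t\t" ++ core) s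
      = s ++ PySem.Str.join "" (l.map pvEntry) := by
  induction l generalizing s with
  | nil => simp [pvJoin_nil]
  | cons x xs ih =>
      simp only [List.foldl_cons, List.map_cons, pvJoin_cons, ih]
      simp [pvEntry, String.append_assoc]

def pvJ (key : String) (l : List (String × String)) : String :=
  PySem.Str.join "" (((l.filter (fun p => p.1 == key)).map Prod.snd).map pvEntry)

theorem pvRunes_fold (l : List (String × String)) (c u r m : String) :
    l.foldl
      (fun (st : String × String × String × String) p =>
        let c := st.1; let u := st.2.1; let r := st.2.2.1; let m := st.2.2.2
        let c := if p.1 == "common" then c ++ "\t\t\"item\"\t\t" ++ p.2 else c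
        let u := if p.1 == "uncommon" then u ++ "\t\t\"item\"\t\t" ++ p.2 else u
        let r := if p.1 == "rare" then r ++ "\t\t\"item\"\t\t" ++ p.2 else r
        let m := if p.1 == "mythical" then m ++ "\t\t\"item\"\t\t" ++ p.2 else m
        (c, u, r, m))
      (c, u, r, m)
      = (c ++ pvJ "common" l, u ++ pvJ "uncommon" l, r ++ pvJ "rare" l, m ++ pvJ "mythical" l) := by
  induction l generalizing c u r m with
  | nil => simp [pvJ, pvJoin_nil]
  | cons p ps ih =>
      simp only [List.foldl_cons, ih, pvJ, List.filter_cons]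
      by_cases h1 : p.1 = "common" <;> by_cases h2 : p.1 = "uncommon" <;>
        by_cases h3 : p.1 = "rare" <;> by_cases h4 : p.1 = "mythical" <;>
        simp_all [pvJoin_cons, pvEntry, String.append_assoc]

-- ===== VERDICT (by name: the statement is the Claim_ definition above) =====
theorem BuildShop_spec : Claim_equal_BuildShop := by
  intro cores runes _
  unfold Spec_BuildShop BuildShop BuildShop_alt
  simp only [pvCores_fold, pvRunes_fold, pvBlock, pvJ, List.map_cons, List.map_nil, List.getD]
  simp
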